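-- pv_equiv track=rewrite | github.com/Cortez1703/AutoReport | Creater_right_data.py | _make_correct_list_of_work
-- ===== SOURCE A (Python) =====
-- def _make_correct_list_of_work(list_of_work_timestamp, dict_of_breaks):
--
--     correct_list_of_work = []
--     for work_time in list_of_work_timestamp:
--         flagik = True
--         for start_break in dict_of_breaks:
--             if dict_of_breaks[start_break][1]:
--                 if work_time > start_break and work_time < dict_of_breaks[start_break][1]:
--                     flagik = False
--
--             else:
--                 if work_time > start_break:
--                     flagik = False
--         if flagik:
--             correct_list_of_work.append(work_time)
--
--
--     return correct_list_of_work
-- ===== SOURCE B (Python) =====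
-- # B: preprocess the breaks once (min open-break start + closed intervals sorted by start
-- # with a running prefix-max of ends), then decide each timestamp by one binary search.
-- def _bisect_right(a, x):
--     lo, hi = 0, len(a)
--     while lo < hi:
--         mid = (lo + hi) // 2
--         if x < a[mid]:
--             hi = mid
--         else:
--             lo = mid + 1
--     return lo
--
--
-- def _make_correct_list_of_work(list_of_work_timestamp, dict_of_breaks):
--     open_min = None
--     intervals = []
--     for start, val in dict_of_breaks.items():
--         end = val[1]
--         if end:
--             intervals.append((start, end))
--         else:
--             if open_min is None or start < open_min:
--                 open_min = start
--     intervals.sort(key=lambda iv: iv[0])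
--     starts = [iv[0] for iv in intervals]
--     prefmax = []
--     best = None
--     for _, end in intervals:
--         best = end if best is None else max(best, end)
--         prefmax.append(best)
--     result = []
--     for t in list_of_work_timestamp:
--         if open_min is not None and t > open_min:
--             continue
--         i = _bisect_right(starts, t - 1)
--         if i > 0 and prefmax[i - 1] > t:
--             continue
--         result.append(t)
--     return result
-- ===== Notes on version B (the rewrite author's own statement) =====
-- stated objective: faster
-- what changed: Instead of rescanning every break for every timestamp, B preprocesses the breaks once (minimum open-break start; closed intervals sorted by start with a running prefix-max of their ends) and then decides each timestamp with a single binary search over the sorted starts.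
-- outside the precondition, e.g. on _make_correct_list_of_work([], {0: [3]}): A returns [], B raises IndexError
import Mathlib
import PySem

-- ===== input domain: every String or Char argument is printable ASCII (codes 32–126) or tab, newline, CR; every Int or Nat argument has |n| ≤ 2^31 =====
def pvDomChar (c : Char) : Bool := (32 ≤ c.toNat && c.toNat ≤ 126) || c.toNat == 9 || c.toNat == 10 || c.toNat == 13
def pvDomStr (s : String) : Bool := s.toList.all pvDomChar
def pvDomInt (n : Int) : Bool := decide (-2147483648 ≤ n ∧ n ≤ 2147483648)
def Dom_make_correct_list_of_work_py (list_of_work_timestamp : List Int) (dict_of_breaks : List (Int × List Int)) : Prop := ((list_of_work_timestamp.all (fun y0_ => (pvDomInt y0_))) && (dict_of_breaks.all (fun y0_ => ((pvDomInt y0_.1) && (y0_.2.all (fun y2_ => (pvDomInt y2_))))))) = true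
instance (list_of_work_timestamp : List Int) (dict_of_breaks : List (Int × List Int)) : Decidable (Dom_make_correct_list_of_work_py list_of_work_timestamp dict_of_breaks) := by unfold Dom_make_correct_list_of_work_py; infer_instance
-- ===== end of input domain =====

-- B preprocesses the breaks once (min open-break start, closed intervals sorted by start with a
-- prefix-max of ends) and decides each timestamp by one binary search instead of rescanning all
-- breaks per timestamp; measurably faster on large inputs (O((n+m) log m) vs O(n*m)).

-- ===== PORT A =====
-- 'for start_break in dict_of_breaks' iterates the dict's keys; dict_of_breaks[start_break]
-- always succeeds for a key of the dict, so getD [] is exact there.  v[1] raises IndexError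
-- when the value list is shorter than 2 — excluded by Pre_; inside Pre_ the .getD 0 is never hit.
def make_correct_list_of_work_py (list_of_work_timestamp : List Int) (dict_of_breaks : List (Int × List Int)) : List Int :=
  let d := PySem.Dict.ofList dict_of_breaks
  list_of_work_timestamp.foldl (fun correct_list_of_work work_time =>
    let flagik := d.keys.foldl (fun flagik start_break =>
      let v := d.getD start_break []
      let e := (PySem.List.pyGet? v 1).getD 0
      if e ≠ 0 then
        if work_time > start_break ∧ work_time < e then false else flagik
      else
        if work_time > start_break then false else flagik) true
    if flagik then correct_list_of_work ++ [work_time] else correct_list_of_work) []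

-- ===== PORT B =====
-- hand-written _bisect_right of Source B (A imports nothing, so Source B may not import bisect);
-- lo, hi stay in [0, len] so Nat subtraction/division are exact; a[mid] has 0 ≤ mid < len
-- whenever Python reads it, so the .getD 0 is never hit on Python's executions.
def bisect_right_b (a : List Int) (x : Int) (lo hi : Nat) : Nat :=
  if h : lo < hi then
    let mid := (lo + hi) / 2
    if x < (PySem.List.pyGet? a (mid : Int)).getD 0 then
      bisect_right_b a x lo mid
    else
      bisect_right_b a x (mid + 1) hi
  else lo
termination_by hi - lo
decreasing_by all_goals omega

-- as in Port A, val[1] raises IndexError for a value list shorter than 2 (excluded by Pre_)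
def make_correct_list_of_work_py_alt (list_of_work_timestamp : List Int) (dict_of_breaks : List (Int × List Int)) : List Int :=
  let d := PySem.Dict.ofList dict_of_breaks
  let st := d.items.foldl (fun (st : Option Int × List (Int × Int)) p =>
      let e := (PySem.List.pyGet? p.2 1).getD 0
      if e ≠ 0 then (st.1, st.2 ++ [(p.1, e)])
      else match st.1 with
        | none => (some p.1, st.2)
        | some m => if p.1 < m then (some p.1, st.2) else (some m, st.2)) (none, [])
  let open_min := st.1
  let intervals := PySem.List.sorted st.2 (fun iv => iv.1) false
  let starts := intervals.map (fun iv => iv.1)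
  let pm := intervals.foldl (fun (pm : Option Int × List Int) iv =>
      let best := match pm.1 with | none => iv.2 | some b => max b iv.2
      (some best, pm.2 ++ [best])) (none, [])
  let prefmax := pm.2
  list_of_work_timestamp.foldl (fun result t =>
    if ((match open_min with | some m => decide (t > m) | none => false) = true) then result
    else
      let i := bisect_right_b starts (t - 1) 0 starts.length
      if i > 0 ∧ (PySem.List.pyGet? prefmax ((i : Int) - 1)).getD 0 > t then result
      else result ++ [t]) []

-- ===== PRECONDITION & SPEC =====
-- Pre_ excludes the inputs where some dict value list has fewer than 2 elements: A raises
-- IndexError on value[1] for every timestamp it checks, and B raises it even when the timestamp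
-- list is empty (B preprocesses all breaks up front, A returns [] there without indexing).
def Pre_make_correct_list_of_work_py (list_of_work_timestamp : List Int) (dict_of_breaks : List (Int × List Int)) : Prop :=
  ∀ p ∈ (PySem.Dict.ofList dict_of_breaks).items, 2 ≤ p.2.length
instance (list_of_work_timestamp : List Int) (dict_of_breaks : List (Int × List Int)) : Decidable (Pre_make_correct_list_of_work_py list_of_work_timestamp dict_of_breaks) := by unfold Pre_make_correct_list_of_work_py; infer_instance
def pvWitness_make_correct_list_of_work_py : List Int × (List (Int × List Int)) := ([1, 3, 7], [(2, [2, 5]), (8, [8, 0])])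

def Spec_make_correct_list_of_work_py (list_of_work_timestamp : List Int) (dict_of_breaks : List (Int × List Int)) (out : List Int) : Prop := out = make_correct_list_of_work_py_alt list_of_work_timestamp dict_of_breaks
instance (list_of_work_timestamp : List Int) (dict_of_breaks : List (Int × List Int)) (out : List Int) : Decidable (Spec_make_correct_list_of_work_py list_of_work_timestamp dict_of_breaks out) := by unfold Spec_make_correct_list_of_work_py; infer_instance

-- ===== CLAIM (what is proved, stated in full; the proofs are below) =====
def Claim_equal_make_correct_list_of_work_py : Prop := ∀ (list_of_work_timestamp : List Int) (dict_of_breaks : List (Int × List Int)), Dom_make_correct_list_of_work_py list_of_work_timestamp dict_of_breaks → Pre_make_correct_list_of_work_py list_of_work_timestamp dict_of_breaks → Spec_make_correct_list_of_work_py list_of_work_timestamp dict_of_breaks (make_correct_list_of_work_py list_of_work_timestamp dict_of_breaks)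

-- ===== LEMMAS AND PROOFS =====

-- the value v[1] (0 when absent; inside Pre_ it is the real v[1])
def pvVal (p : Int × List Int) : Int := (PySem.List.pyGet? p.2 1).getD 0

-- one break excludes timestamp t (exactly A's inner-loop test)
def pvExcl (t : Int) (p : Int × List Int) : Bool :=
  if pvVal p ≠ 0 then decide (t > p.1 ∧ t < pvVal p) else decide (t > p.1)

def pvKeep (items : List (Int × List Int)) (t : Int) : Bool := items.all (fun p => !pvExcl t p)

def pvOpens (items : List (Int × List Int)) : List Int :=
  items.filterMap (fun p => if pvVal p = 0 then some p.1 else none)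

def pvCloseds (items : List (Int × List Int)) : List (Int × Int) :=
  items.filterMap (fun p => if pvVal p ≠ 0 then some (p.1, pvVal p) else none)

def pvMinStep (o : Option Int) (s : Int) : Option Int :=
  match o with | none => some s | some m => if s < m then some s else some m

def pvPm : Option Int → List (Int × Int) → List Int
  | _, [] => []
  | b, iv :: ivs =>
      let best := match b with | none => iv.2 | some b' => max b' iv.2
      best :: pvPm (some best) ivs

def pvPmOpt : Option Int → List (Int × Int) → Option Int
  | b, [] => b
  | b, iv :: ivs =>
      let best := match b with | none => iv.2 | some b' => max b' iv.2
      pvPmOpt (some best) ivs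

-- ---- A-side ----
theorem pv_inner_fold (d : PySem.Dict Int (List Int)) (t : Int) (L : List Int) (b : Bool) :
    L.foldl (fun flagik start_break =>
      let v := d.getD start_break []
      let e := (PySem.List.pyGet? v 1).getD 0
      if e ≠ 0 then
        if t > start_break ∧ t < e then false else flagik
      else
        if t > start_break then false else flagik) b
    = (b && L.all (fun sb => !pvExcl t (sb, d.getD sb []))) := by
  induction L generalizing b with
  | nil => simp
  | cons sb L ih =>
    simp only [List.foldl_cons, List.all_cons]
    rw [ih, ← Bool.and_assoc]
    congr 1
    simp only [pvExcl, pvVal]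
    split_ifs <;> cases b <;> simp <;> omega

theorem pv_A_filter (lst : List Int) (dob : List (Int × List Int)) :
    make_correct_list_of_work_py lst dob
      = lst.filter (pvKeep (PySem.Dict.ofList dob).items) := by
  unfold make_correct_list_of_work_py
  have hall : ∀ t : Int, (PySem.Dict.ofList dob).keys.all
        (fun sb => !pvExcl t (sb, (PySem.Dict.ofList dob).getD sb []))
      = pvKeep (PySem.Dict.ofList dob).items t := by
    intro t
    unfold pvKeep
    rw [PySem.Dict.items_eq_map_keys (PySem.Dict.ofList dob) (PySem.Dict.nodup_keys_ofList dob) []]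
    rw [List.all_map]
    rfl
  dsimp only
  rw [PySem.List.foldl_congr_mem lst _
    (fun acc wt => if pvKeep (PySem.Dict.ofList dob).items wt = true then acc ++ [wt] else acc) []
    (by
      intro acc wt _
      dsimp only
      rw [pv_inner_fold, Bool.true_and, hall])]
  rw [PySem.List.foldl_append_if_eq_filter]
  simp

-- ---- B-side ----
theorem pv_pre_fold (L : List (Int × List Int)) (o : Option Int) (acc : List (Int × Int)) :
    L.foldl (fun (st : Option Int × List (Int × Int)) p =>
      let e := (PySem.List.pyGet? p.2 1).getD 0
      if e ≠ 0 then (st.1, st.2 ++ [(p.1, e)])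
      else match st.1 with
        | none => (some p.1, st.2)
        | some m => if p.1 < m then (some p.1, st.2) else (some m, st.2)) (o, acc)
    = ((pvOpens L).foldl pvMinStep o, acc ++ pvCloseds L) := by
  induction L generalizing o acc with
  | nil => simp [pvOpens, pvCloseds]
  | cons p L ih =>
    simp only [List.foldl_cons]
    by_cases h : (PySem.List.pyGet? p.2 1).getD 0 = 0
    · have ho : pvOpens (p :: L) = p.1 :: pvOpens L := by simp [pvOpens, pvVal, h]
      have hc : pvCloseds (p :: L) = pvCloseds L := by simp [pvCloseds, pvVal, h]
      rw [ho, hc]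
      rw [if_neg (by simp [h])]
      cases o with
      | none => rw [ih]; rfl
      | some m =>
        by_cases hm : p.1 < m
        · simp only [if_pos hm]; rw [ih]; simp [pvMinStep, hm]
        · simp only [if_neg hm]; rw [ih]; simp [pvMinStep, hm]
    · have ho : pvOpens (p :: L) = pvOpens L := by simp [pvOpens, pvVal, h]
      have hc : pvCloseds (p :: L) = (p.1, (PySem.List.pyGet? p.2 1).getD 0) :: pvCloseds L := by
        simp [pvCloseds, pvVal, h]
      rw [ho, hc]
      simp only [if_pos h]
      rw [ih]
      simp

theorem pv_min_gt (M : List Int) (o : Option Int) (t : Int) :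
    (match M.foldl pvMinStep o with | some m => decide (t > m) | none => false)
    = ((match o with | some m => decide (t > m) | none => false) || M.any (fun s => decide (t > s))) := by
  induction M generalizing o with
  | nil => simp
  | cons s M ih =>
    simp only [List.foldl_cons, List.any_cons, ih]
    cases o with
    | none => simp [pvMinStep]
    | some m =>
      simp only [pvMinStep]
      cases hP : M.any (fun s => decide (t > s)) <;>
        split_ifs with h <;> simp <;> omega

theorem pv_pm_fold (S : List (Int × Int)) (b : Option Int) (acc : List Int) :
    S.foldl (fun (pm : Option Int × List Int) iv =>
      let best := match pm.1 with | none => iv.2 | some b => max b iv.2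
      (some best, pm.2 ++ [best])) (b, acc)
    = (pvPmOpt b S, acc ++ pvPm b S) := by
  induction S generalizing b acc with
  | nil => simp [pvPm, pvPmOpt]
  | cons iv S ih =>
    simp only [List.foldl_cons]
    rw [ih]
    cases b <;> simp [pvPm, pvPmOpt]

theorem pv_pm_len (b : Option Int) (S : List (Int × Int)) : (pvPm b S).length = S.length := by
  induction S generalizing b with
  | nil => rfl
  | cons iv S ih => cases b <;> simp [pvPm, ih]

theorem pv_pm_gt (S : List (Int × Int)) (b : Option Int) (k : Nat) (hk : k < S.length) (t : Int) :
    t < (pvPm b S)[k]'(by rw [pv_pm_len]; exact hk)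
    ↔ ((match b with | some m => t < m | none => False) ∨ ∃ j, j ≤ k ∧ ∃ hj : j < S.length, t < (S[j]).2) := by
  induction S generalizing b k with
  | nil => simp at hk
  | cons iv S ih =>
    cases k with
    | zero =>
      cases b with
      | none =>
        show t < iv.2 ↔ _
        constructor
        · intro h; exact Or.inr ⟨0, le_refl 0, by simp, h⟩
        · rintro (h | ⟨j, hj0, hjl, hjv⟩)
          · exact h.elim
          · have hj : j = 0 := Nat.le_zero.mp hj0
            subst hj; exact hjv
      | some m =>
        show t < max m iv.2 ↔ _
        constructor
        · intro h
          rcases lt_max_iff.mp h with h | h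
          · exact Or.inl h
          · exact Or.inr ⟨0, le_refl 0, by simp, h⟩
        · rintro (h | ⟨j, hj0, hjl, hjv⟩)
          · exact lt_max_iff.mpr (Or.inl h)
          · have hj : j = 0 := Nat.le_zero.mp hj0
            subst hj; exact lt_max_iff.mpr (Or.inr hjv)
    | succ k =>
      have hk' : k < S.length := by simpa using hk
      have hbest : ∀ best : Int,
          (t < (pvPm (some best) S)[k]'(by rw [pv_pm_len]; exact hk')
           ↔ (t < best ∨ ∃ j, j ≤ k ∧ ∃ hj : j < S.length, t < (S[j]).2)) := by
        intro best; simpa using ih (some best) k hk'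
      cases b with
      | none =>
        simp only [pvPm]
        rw [show ((iv.2 :: pvPm (some iv.2) S)[k+1]'(by simp [pv_pm_len, hk']) = (pvPm (some iv.2) S)[k]'(by rw [pv_pm_len]; exact hk')) from rfl]
        rw [hbest iv.2]
        constructor
        · rintro (h | ⟨j, hjk, hjl, hjv⟩)
          · exact Or.inr ⟨0, by omega, by simp, by simpa using h⟩
          · exact Or.inr ⟨j+1, by omega, by simpa using hjl, by simpa using hjv⟩
        · rintro (h | ⟨j, hjk, hjl, hjv⟩)
          · exact absurd h (by simp)
          · cases j with
            | zero => exact Or.inl (by simpa using hjv)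
            | succ j => exact Or.inr ⟨j, by omega, by simpa using hjl, by simpa using hjv⟩
      | some m =>
        simp only [pvPm]
        rw [show (((max m iv.2) :: pvPm (some (max m iv.2)) S)[k+1]'(by simp [pv_pm_len, hk']) = (pvPm (some (max m iv.2)) S)[k]'(by rw [pv_pm_len]; exact hk')) from rfl]
        rw [hbest (max m iv.2)]
        constructor
        · rintro (h | ⟨j, hjk, hjl, hjv⟩)
          · rcases lt_max_iff.mp h with h | h
            · exact Or.inl h
            · exact Or.inr ⟨0, by omega, by simp, by simpa using h⟩
          · exact Or.inr ⟨j+1, by omega, by simpa using hjl, by simpa using hjv⟩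
        · rintro (h | ⟨j, hjk, hjl, hjv⟩)
          · exact Or.inl (lt_max_iff.mpr (Or.inl h))
          · cases j with
            | zero => exact Or.inl (lt_max_iff.mpr (Or.inr (by simpa using hjv)))
            | succ j => exact Or.inr ⟨j, by omega, by simpa using hjl, by simpa using hjv⟩

theorem pv_bisect_spec (a : List Int) (x : Int) (hs : a.Pairwise (· ≤ ·)) :
    ∀ n lo hi, hi - lo = n → lo ≤ hi → hi ≤ a.length →
    (∀ j (hj : j < a.length), j < lo → a[j] ≤ x) →
    (∀ j (hj : j < a.length), hi ≤ j → x < a[j]) →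
    lo ≤ bisect_right_b a x lo hi ∧ bisect_right_b a x lo hi ≤ hi ∧
    (∀ j (hj : j < a.length), j < bisect_right_b a x lo hi → a[j] ≤ x) ∧
    (∀ j (hj : j < a.length), bisect_right_b a x lo hi ≤ j → x < a[j]) := by
  have hmono : ∀ (p q : Nat) (hp : p ≤ q) (hq : q < a.length), a[p]'(by omega) ≤ a[q] := by
    intro p q hp hq
    rcases Nat.lt_or_ge p q with h | h
    · exact (List.pairwise_iff_getElem.mp hs) p q (by omega) hq h
    · have : p = q := by omega
      subst this; exact le_refl _
  intro n
  induction n using Nat.strong_induction_on with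
  | _ n ih =>
    intro lo hi hn hlohi hhi hbelow habove
    rw [bisect_right_b]
    by_cases h : lo < hi
    · rw [dif_pos h]
      have hmidlt : (lo + hi) / 2 < a.length := by omega
      have hget : (PySem.List.pyGet? a (Nat.cast ((lo + hi) / 2))).getD 0 = a[(lo + hi) / 2] := by
        rw [PySem.List.pyGet?_natCast, List.getElem?_eq_getElem hmidlt]
        rfl
      simp only [hget]
      by_cases hx : x < a[(lo + hi) / 2]
      · rw [if_pos hx]
        have := ih ((lo + hi) / 2 - lo) (by omega) lo ((lo + hi) / 2) rfl (by omega) (by omega)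
          hbelow
          (fun j hj hle => lt_of_lt_of_le hx (hmono _ j hle hj))
        exact ⟨this.1, by omega, this.2.2⟩
      · rw [if_neg hx]
        push Not at hx
        have := ih (hi - ((lo + hi) / 2 + 1)) (by omega) ((lo + hi) / 2 + 1) hi rfl (by omega) hhi
          (fun j hj hlt => le_trans (hmono j ((lo + hi) / 2) (by omega) hmidlt) hx)
          habove
        exact ⟨by omega, this.2.1, this.2.2⟩
    · rw [dif_neg h]
      have : lo = hi := by omega
      exact ⟨le_refl _, by omega, fun j hj hjlt => hbelow j hj hjlt, fun j hj hjge => habove j hj (by omega)⟩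

theorem pv_keep_split (items : List (Int × List Int)) (t : Int) :
    pvKeep items t
    = (!(pvOpens items).any (fun s => decide (t > s))
       && !(pvCloseds items).any (fun q => decide (q.1 < t ∧ t < q.2))) := by
  induction items with
  | nil => simp [pvKeep, pvOpens, pvCloseds]
  | cons p L ih =>
    by_cases h : pvVal p = 0
    · have ho : pvOpens (p :: L) = p.1 :: pvOpens L := by simp [pvOpens, h]
      have hc : pvCloseds (p :: L) = pvCloseds L := by simp [pvCloseds, h]
      simp only [pvKeep, List.all_cons, ho, hc, List.any_cons] at *
      rw [ih]
      simp [pvExcl, h]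
      rw [Bool.and_assoc]
    · have ho : pvOpens (p :: L) = pvOpens L := by simp [pvOpens, h]
      have hc : pvCloseds (p :: L) = (p.1, pvVal p) :: pvCloseds L := by simp [pvCloseds, h]
      simp only [pvKeep, List.all_cons, ho, hc, List.any_cons] at *
      rw [ih]
      simp [pvExcl, h]
      rw [Bool.and_left_comm]

theorem pv_cover (C : List (Int × Int)) (t : Int) :
    (let S := PySem.List.sorted C (fun iv => iv.1) false
     let starts := S.map (fun iv => iv.1)
     let i := bisect_right_b starts (t - 1) 0 starts.length
     decide (i > 0 ∧ (PySem.List.pyGet? (pvPm none S) ((i : Int) - 1)).getD 0 > t))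
    = C.any (fun q => decide (q.1 < t ∧ t < q.2)) := by
  set S := PySem.List.sorted C (fun iv => iv.1) false with hS
  set starts := S.map (fun iv => iv.1) with hstarts
  set i := bisect_right_b starts (t - 1) 0 starts.length with hi
  have hlen : starts.length = S.length := by simp [hstarts]
  have hpair : starts.Pairwise (· ≤ ·) := by
    rw [hstarts, hS]
    exact PySem.List.sorted_map_key_pairwise C (fun iv => iv.1)
  obtain ⟨-, hile, hlt, hgt⟩ := pv_bisect_spec starts (t - 1) hpair starts.length 0 starts.length
    (by omega) (Nat.zero_le _) (le_refl _) (fun j hj hjl => by omega) (fun j hj hjg => by omega)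
  have hmain : (i > 0 ∧ (PySem.List.pyGet? (pvPm none S) ((i : Int) - 1)).getD 0 > t)
      ↔ ∃ q ∈ C, q.1 < t ∧ t < q.2 := by
    constructor
    · rintro ⟨hi0, hpm⟩
      have hi1 : i - 1 < S.length := by omega
      have hcast : (i : Int) - 1 = ((i - 1 : Nat) : Int) := by omega
      rw [hcast, PySem.List.pyGet?_natCast,
        List.getElem?_eq_getElem (by rw [pv_pm_len]; exact hi1)] at hpm
      have := (pv_pm_gt S none (i - 1) hi1 t).mp hpm
      rcases this with h | ⟨j, hjk, hjl, hjv⟩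
      · exact h.elim
      · refine ⟨S[j], ?_, ?_, hjv⟩
        · rw [← PySem.List.mem_sorted C (fun iv => iv.1) false, ← hS]
          exact List.getElem_mem hjl
        · have hji : j < i := by omega
          have := hlt j (by omega) hji
          simp only [hstarts, List.getElem_map] at this
          omega
    · rintro ⟨q, hqC, hq1, hq2⟩
      have hqS : q ∈ S := by
        rw [hS, PySem.List.mem_sorted]; exact hqC
      obtain ⟨j, hjl, rfl⟩ := List.getElem_of_mem hqS
      have hji : j < i := by
        by_contra hc
        have := hgt j (by omega) (by omega)
        simp only [hstarts, List.getElem_map] at this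
        omega
      have hi1 : i - 1 < S.length := by omega
      refine ⟨by omega, ?_⟩
      have hcast : (i : Int) - 1 = ((i - 1 : Nat) : Int) := by omega
      rw [hcast, PySem.List.pyGet?_natCast,
        List.getElem?_eq_getElem (by rw [pv_pm_len]; exact hi1)]
      show t < _
      exact (pv_pm_gt S none (i - 1) hi1 t).mpr (Or.inr ⟨j, by omega, hjl, hq2⟩)
  calc (decide (i > 0 ∧ (PySem.List.pyGet? (pvPm none S) ((i : Int) - 1)).getD 0 > t))
      = decide (∃ q ∈ C, q.1 < t ∧ t < q.2) := by rw [decide_eq_decide]; exact hmain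
    _ = C.any (fun q => decide (q.1 < t ∧ t < q.2)) := by
        rw [Bool.eq_iff_iff]
        simp only [decide_eq_true_eq, List.any_eq_true]

theorem pv_B_filter (lst : List Int) (dob : List (Int × List Int)) :
    make_correct_list_of_work_py_alt lst dob
      = lst.filter (pvKeep (PySem.Dict.ofList dob).items) := by
  unfold make_correct_list_of_work_py_alt
  dsimp only
  rw [pv_pre_fold, pv_pm_fold, List.nil_append, List.nil_append]
  set C' := (PySem.Dict.ofList dob).items with hC'
  rw [PySem.List.foldl_congr_mem lst _
    (fun res t => if pvKeep C' t = true then res ++ [t] else res) []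
    (by
      intro res t _
      dsimp only
      rw [pv_keep_split]
      have hmin := pv_min_gt (pvOpens C') none t
      have h2 := pv_cover (pvCloseds C') t
      dsimp only at h2
      cases hM : List.foldl pvMinStep none (pvOpens C') with
      | none =>
        simp only [hM] at hmin ⊢
        try dsimp only at hmin ⊢
        replace hmin : (pvOpens C').any (fun s => decide (t > s)) = false := by
          simpa using hmin.symm
        rw [hmin]
        rw [if_neg (by simp)]
        simp only [Bool.not_false, Bool.true_and]
        cases hCv : (pvCloseds C').any (fun q => decide (q.1 < t ∧ t < q.2)) with
        | true =>
          rw [hCv] at h2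
          rw [if_pos (of_decide_eq_true h2)]
          simp
        | false =>
          rw [hCv] at h2
          rw [if_neg (of_decide_eq_false h2)]
          simp
      | some m =>
        simp only [hM] at hmin ⊢
        try dsimp only at hmin ⊢
        replace hmin : (pvOpens C').any (fun s => decide (t > s)) = decide (t > m) := by
          simpa using hmin.symm
        rw [hmin]
        by_cases hd : t > m
        · have hdt : decide (t > m) = true := decide_eq_true hd
          rw [if_pos hdt]
          simp [hdt]
        · have hdf : decide (t > m) = false := decide_eq_false hd
          rw [if_neg (by simp [hdf])]
          simp only [hdf, Bool.not_false, Bool.true_and]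
          cases hCv : (pvCloseds C').any (fun q => decide (q.1 < t ∧ t < q.2)) with
          | true =>
            rw [hCv] at h2
            rw [if_pos (of_decide_eq_true h2)]
            simp
          | false =>
            rw [hCv] at h2
            rw [if_neg (of_decide_eq_false h2)]
            simp)]
  rw [PySem.List.foldl_append_if_eq_filter]
  simp

-- ===== VERDICT (by name: the statement is the Claim_ definition above) =====
theorem make_correct_list_of_work_py_spec : Claim_equal_make_correct_list_of_work_py := by
  intro lst dob _ _
  unfold Spec_make_correct_list_of_work_py
  rw [pv_A_filter, pv_B_filter]
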